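-- pv_equiv track=rewrite | github.com/ikibalin/cryspy | cryspy/A_functions_base/function_2_space_group.py | get_name_schoenfliess_by_laue_class
-- ===== SOURCE A (Python) =====
-- from typing import Tuple
--
-- ACCESIBLE_NAME_SCHOENFLIES = (
-- "C1.1", "Ci.1", "C2.1", "C2.2", "C2.3", "Cs.1", "Cs.2", "Cs.3", "Cs.4", "C2h.1", "C2h.2", "C2h.3", "C2h.4",
-- "C2h.5", "C2h.6", "D2.1", "D2.2", "D2.3", "D2.4", "D2.5", "D2.6", "D2.7", "D2.8", "D2.9", "C2v.1", "C2v.2", "C2v.3",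
-- "C2v.4", "C2v.5",
-- "C2v.6", "C2v.7", "C2v.8", "C2v.9", "C2v.10", "C2v.11", "C2v.12", "C2v.13", "C2v.14", "C2v.15", "C2v.16", "C2v.17",
-- "C2v.18", "C2v.19",
-- "C2v.20", "C2v.21", "C2v.22", "D2h.1", "D2h.2", "D2h.3", "D2h.4", "D2h.5", "D2h.6", "D2h.7", "D2h.8", "D2h.9", "D2h.10",
-- "D2h.11", "D2h.12",
-- "D2h.13", "D2h.14", "D2h.15", "D2h.16", "D2h.17", "D2h.18", "D2h.19", "D2h.20", "D2h.21", "D2h.22", "D2h.23", "D2h.24",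
-- "D2h.25", "D2h.26",
-- "D2h.27", "D2h.28", "C4.1", "C4.2", "C4.3", "C4.4", "C4.5", "C4.6", "S4.1", "S4.2", "C4h.1", "C4h.2", "C4h.3", "C4h.4",
-- "C4h.5", "C4h.6",
-- "D4.1", "D4.2", "D4.3", "D4.4", "D4.5", "D4.6", "D4.7", "D4.8", "D4.9", "D4.10", "C4v.1", "C4v.2", "C4v.3", "C4v.4",
-- "C4v.5", "C4v.6", "C4v.7",
-- "C4v.8", "C4v.9", "C4v.10", "C4v.11", "C4v.12", "D2d.1", "D2d.2", "D2d.3", "D2d.4", "D2d.5", "D2d.6", "D2d.7", "D2d.8",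
-- "D2d.9", "D2d.10",
-- "D2d.11", "D2d.12", "D4h.1", "D4h.2", "D4h.3", "D4h.4", "D4h.5", "D4h.6", "D4h.7", "D4h.8", "D4h.9", "D4h.10", "D4h.11",
-- "D4h.12", "D4h.13",
-- "D4h.14", "D4h.15", "D4h.16", "D4h.17", "D4h.18", "D4h.19", "D4h.20", "C3.1", "C3.2", "C3.3", "C3.4", "C3i.1", "C3i.2",
-- "D3.1", "D3.2", "D3.3",
-- "D3.4", "D3.5", "D3.6", "D3.7", "C3v.1", "C3v.2", "C3v.3", "C3v.4", "C3v.5", "C3v.6", "D3d.1", "D3d.2", "D3d.3",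
-- "D3d.4", "D3d.5", "D3d.6",
-- "C6.1", "C6.2", "C6.3", "C6.4", "C6.5", "C6.6", "C3h.1", "C6h.1", "C6h.2", "D6.1", "D6.2", "D6.3", "D6.4", "D6.5",
-- "D6.6", "C6v.1", "C6v.2",
-- "C6v.3", "C6v.4", "D3h.1", "D3h.2", "D3h.3", "D3h.4", "D6h.1", "D6h.2", "D6h.3", "D6h.4", "T.1", "T.2", "T.3", "T.4",
-- "T.5", "Th.1", "Th.2",
-- "Th.3", "Th.4", "Th.5", "Th.6", "Th.7", "O.1", "O.2", "O.3", "O.4", "O.5", "O.6", "O.7", "O.8", "Td.1", "Td.2", "Td.3",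
-- "Td.4", "Td.5", "Td.6",
-- "Oh.1", "Oh.2", "Oh.3", "Oh.4", "Oh.5", "Oh.6", "Oh.7", "Oh.8", "Oh.9", "Oh.10")
--
-- REFERENCE_TABLE_LAUE_CLASS_SHORT_FULL_POINT_GROUP_HM_SYMBOL_SHORT_FULL_SCHOENFLIES = (
--     ("-1", "-1", "1", "1", "C1"),
--     ("-1", "-1", "-1", "-1", "Ci"),
--     ("2/m", "2/m", "2", "2", "C2"),
--     ("2/m", "2/m", "m", "m", "Cs"),
--     ("2/m", "2/m", "2/m", "2/m", "C2h"),
--     ("mmm", "2/m2/m2/m", "222", "222", "D2"),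
--     ("mmm", "2/m2/m2/m", "mm2", "mm2", "C2v"),
--     ("mmm", "2/m2/m2/m", "mmm", "2/m2/m2/m", "D2h"),
--     ("4/m", "4/m", "4", "4", "C4"),
--     ("4/m", "4/m", "-4", "-4", "S4"),
--     ("4/m", "4/m", "4/m", "4/m", "C4h"),
--     ("4/mmm", "4/m2/m2/m", "422", "422", "D4"),
--     ("4/mmm", "4/m2/m2/m", "4mm", "4mm", "C4v"),
--     ("4/mmm", "4/m2/m2/m", "-42m", "-42m", "D2d"),
--     ("4/mmm", "4/m2/m2/m", "4/mmm", "4/m2/m2/m", "D4h"),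
--     ("-3", "-3", "3", "3", "C3"),
--     ("-3", "-3", "-3", "-3", "C3i"),
--     ("-3m", "-32/m", "32", "32", "D3"),
--     ("-3m", "-32/m", "3m", "3m", "C3v"),
--     ("-3m", "-32/m", "-3m", "-32/m", "D3d"),
--     ("6/m", "6/m", "6", "6", "C6"),
--     ("6/m", "6/m", "-6", "-6", "C3h"),
--     ("6/m", "6/m", "6/m", "6/m", "C6h"),
--     ("6/mmm", "6/m2/m2/m", "622", "622", "D6"),
--     ("6/mmm", "6/m2/m2/m", "6mm", "6mm", "D6v"),
--     ("6/mmm", "6/m2/m2/m", "-62m", "-62m", "D3h"),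
--     ("6/mmm", "6/m2/m2/m", "6/mmm", "6/m2/m2/m", "D6h"),
--     ("m-3", "2/m-3", "23", "23", "T"),
--     ("m-3", "2/m-3", "m-3", "2/m-3", "Th"),
--     ("m-3m", "4/m-32/m", "432", "432", "O"),
--     ("m-3m", "4/m-32/m", "-43m", "-43m", "Td"),
--     ("m-3m", "4/m-32/m", "m-3m", "4/m-32/m", "Oh")
-- )
--
-- def get_name_schoenfliess_by_laue_class(laue_class: str) -> Tuple[str]:
--     l_symb = [_5 for _1, _2, _3, _4, _5 in
--               REFERENCE_TABLE_LAUE_CLASS_SHORT_FULL_POINT_GROUP_HM_SYMBOL_SHORT_FULL_SCHOENFLIES if _1 == laue_class]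
--     l_res = []
--     for symb in l_symb:
--         for _name_schoenflies in ACCESIBLE_NAME_SCHOENFLIES:
--             _symb = _name_schoenflies.split(".")[0]
--             if symb == _symb:
--                 l_res.append(_name_schoenflies)
--     return tuple(l_res)
-- ===== SOURCE B (Python) =====
-- from typing import Tuple
--
-- # Laue class -> Schoenflies symbols of its point groups, in table-row order.
-- # (Fixes the reference table's typo "D6v": the Schoenflies symbol of point group 6mm is "C6v".)
-- LAUE_CLASS_TO_SCHOENFLIES = {
--     "-1": ("C1", "Ci"),
--     "2/m": ("C2", "Cs", "C2h"),
--     "mmm": ("D2", "C2v", "D2h"),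
--     "4/m": ("C4", "S4", "C4h"),
--     "4/mmm": ("D4", "C4v", "D2d", "D4h"),
--     "-3": ("C3", "C3i"),
--     "-3m": ("D3", "C3v", "D3d"),
--     "6/m": ("C6", "C3h", "C6h"),
--     "6/mmm": ("D6", "C6v", "D3h", "D6h"),
--     "m-3": ("T", "Th"),
--     "m-3m": ("O", "Td", "Oh"),
-- }
--
-- # Number of accessible space-group settings "<symb>.1" .. "<symb>.<count>" per Schoenflies symbol.
-- SCHOENFLIES_SETTING_COUNT = {
--     "C1": 1, "Ci": 1, "C2": 3, "Cs": 4, "C2h": 6, "D2": 9, "C2v": 22, "D2h": 28,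
--     "C4": 6, "S4": 2, "C4h": 6, "D4": 10, "C4v": 12, "D2d": 12, "D4h": 20,
--     "C3": 4, "C3i": 2, "D3": 7, "C3v": 6, "D3d": 6, "C6": 6, "C3h": 1, "C6h": 2,
--     "D6": 6, "C6v": 4, "D3h": 4, "D6h": 4, "T": 5, "Th": 7, "O": 8, "Td": 6, "Oh": 10,
-- }
--
-- def get_name_schoenfliess_by_laue_class(laue_class: str) -> Tuple[str]:
--     res = []
--     for symb in LAUE_CLASS_TO_SCHOENFLIES.get(laue_class, ()):
--         for i in range(1, SCHOENFLIES_SETTING_COUNT[symb] + 1):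
--             res.append(symb + "." + str(i))
--     return tuple(res)
-- ===== Notes on version B (the rewrite author's own statement) =====
-- stated objective: alternative
-- what changed: Replaces A's symbol-major nested scan of the 230-name tuple with a closed-form generator: a laue-class-to-symbols dict plus a per-symbol setting count, emitting '<symb>.1'..'<symb>.<count>' directly, which is correct because the names tuple is exactly those runs in table-row order.
-- intended difference: For laue_class '6/mmm' A returns a tuple missing the four C6v.* names because the reference table misspells the Schoenflies symbol of point group 6mm as 'D6v'; B uses the correct symbol C6v and includes them, which is the intended result. — e.g. on get_name_schoenfliess_by_laue_class("6/mmm"): A returns ["D6.1", "D6.2", "D6.3", "D6.4", "D6.5", "D6.6", "D3h.1", "D3h.2", "D3h.3", "D3h.4", "D6h.1", "D6h.2", "D6h.3", "D6h.4"], B returns ["D6.1", "D6.2", "D6.3", "D6.4", "D6.5", "D6.6", "C6v.1", "C6v.2", "C6v.3", "C6v.4", "D3h.1", "D3h.2", "D3h.3", "D3h.4"…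
import Mathlib
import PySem

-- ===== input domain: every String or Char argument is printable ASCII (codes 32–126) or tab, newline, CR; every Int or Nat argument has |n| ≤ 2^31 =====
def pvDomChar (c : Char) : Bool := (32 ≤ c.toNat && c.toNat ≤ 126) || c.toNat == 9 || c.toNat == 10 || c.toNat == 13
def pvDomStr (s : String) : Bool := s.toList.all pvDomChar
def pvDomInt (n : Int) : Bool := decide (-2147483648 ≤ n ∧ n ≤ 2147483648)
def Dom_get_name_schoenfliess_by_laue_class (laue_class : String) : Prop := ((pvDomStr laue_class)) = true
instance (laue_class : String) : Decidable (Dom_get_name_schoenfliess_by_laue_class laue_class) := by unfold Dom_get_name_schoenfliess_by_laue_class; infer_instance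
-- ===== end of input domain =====

set_option maxRecDepth 100000
set_option maxHeartbeats 4000000

-- ===== PORT A =====
-- B replaces A's symbol-major nested scan by a closed-form generator driven by two small dicts
-- (objective: alternative); for "6/mmm" B additionally fixes the table's "D6v" typo (see D_ below).
def pvNames : List String := ["C1.1", "Ci.1", "C2.1", "C2.2", "C2.3", "Cs.1", "Cs.2", "Cs.3", "Cs.4", "C2h.1", "C2h.2", "C2h.3", "C2h.4", "C2h.5", "C2h.6", "D2.1", "D2.2", "D2.3", "D2.4", "D2.5", "D2.6", "D2.7", "D2.8", "D2.9", "C2v.1", "C2v.2", "C2v.3", "C2v.4", "C2v.5", "C2v.6", "C2v.7", "C2v.8", "C2v.9", "C2v.10", "C2v.11", "C2v.12", "C2v.13", "C2v.14", "C2v.15", "C2v.16", "C2v.17", "C2v.18", "C2v.19", "C2v.20", "C2v.21", "C2v.22", "D2h.1", "D2h.2", "D2h.3", "D2h.4", "D2h.5", "D2h.6", "D2h.7", "D2h.8", "D2h.9", "D2h.10", "D2h.11", "D2h.12", "D2h.13", "D2h.14", "D2h.15", "D2h.16", "D2h.17", "D2h.18", "D2h.19", "D2h.20", "D2h.21", "D2h.22",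 "D2h.23", "D2h.24", "D2h.25", "D2h.26", "D2h.27", "D2h.28", "C4.1", "C4.2", "C4.3", "C4.4", "C4.5", "C4.6", "S4.1", "S4.2", "C4h.1", "C4h.2", "C4h.3", "C4h.4", "C4h.5", "C4h.6", "D4.1", "D4.2", "D4.3", "D4.4", "D4.5", "D4.6", "D4.7", "D4.8", "D4.9", "D4.10", "C4v.1", "C4v.2", "C4v.3", "C4v.4", "C4v.5", "C4v.6", "C4v.7", "C4v.8", "C4v.9", "C4v.10", "C4v.11", "C4v.12", "D2d.1", "D2d.2", "D2d.3", "D2d.4", "D2d.5", "D2d.6", "D2d.7", "D2d.8", "D2d.9", "D2d.10", "D2d.11", "D2d.12", "D4h.1", "D4h.2", "D4h.3", "D4h.4", "D4h.5", "D4h.6", "D4h.7", "D4h.8", "D4h.9", "D4h.10", "D4h.11", "D4h.12", "D4h.13", "D4h.14", "D4h.15", "D4h.16", "D4h.17", "D4h.18", "D4h.19", "D4h.20", "C3.1", "C3.2", "C3.3", "C3.4", "C3i.1", "C3i.2", "D3.1", "D3.2", "D3.3", "D3.4", "D3.5", "D3.6", "D3.7", "C3v.1", "C3v.2", "C3v.3",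 "C3v.4", "C3v.5", "C3v.6", "D3d.1", "D3d.2", "D3d.3", "D3d.4", "D3d.5", "D3d.6", "C6.1", "C6.2", "C6.3", "C6.4", "C6.5", "C6.6", "C3h.1", "C6h.1", "C6h.2", "D6.1", "D6.2", "D6.3", "D6.4", "D6.5", "D6.6", "C6v.1", "C6v.2", "C6v.3", "C6v.4", "D3h.1", "D3h.2", "D3h.3", "D3h.4", "D6h.1", "D6h.2", "D6h.3", "D6h.4", "T.1", "T.2", "T.3", "T.4", "T.5", "Th.1", "Th.2", "Th.3", "Th.4", "Th.5", "Th.6", "Th.7", "O.1", "O.2", "O.3", "O.4", "O.5", "O.6", "O.7", "O.8", "Td.1", "Td.2", "Td.3", "Td.4", "Td.5", "Td.6", "Oh.1", "Oh.2", "Oh.3", "Oh.4", "Oh.5", "Oh.6", "Oh.7", "Oh.8", "Oh.9", "Oh.10"]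

def pvTable : List (String × String × String × String × String) := [
  ("-1", "-1", "1", "1", "C1"),
  ("-1", "-1", "-1", "-1", "Ci"),
  ("2/m", "2/m", "2", "2", "C2"),
  ("2/m", "2/m", "m", "m", "Cs"),
  ("2/m", "2/m", "2/m", "2/m", "C2h"),
  ("mmm", "2/m2/m2/m", "222", "222", "D2"),
  ("mmm", "2/m2/m2/m", "mm2", "mm2", "C2v"),
  ("mmm", "2/m2/m2/m", "mmm", "2/m2/m2/m", "D2h"),
  ("4/m", "4/m", "4", "4", "C4"),
  ("4/m", "4/m", "-4", "-4", "S4"),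
  ("4/m", "4/m", "4/m", "4/m", "C4h"),
  ("4/mmm", "4/m2/m2/m", "422", "422", "D4"),
  ("4/mmm", "4/m2/m2/m", "4mm", "4mm", "C4v"),
  ("4/mmm", "4/m2/m2/m", "-42m", "-42m", "D2d"),
  ("4/mmm", "4/m2/m2/m", "4/mmm", "4/m2/m2/m", "D4h"),
  ("-3", "-3", "3", "3", "C3"),
  ("-3", "-3", "-3", "-3", "C3i"),
  ("-3m", "-32/m", "32", "32", "D3"),
  ("-3m", "-32/m", "3m", "3m", "C3v"),
  ("-3m", "-32/m", "-3m", "-32/m", "D3d"),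
  ("6/m", "6/m", "6", "6", "C6"),
  ("6/m", "6/m", "-6", "-6", "C3h"),
  ("6/m", "6/m", "6/m", "6/m", "C6h"),
  ("6/mmm", "6/m2/m2/m", "622", "622", "D6"),
  ("6/mmm", "6/m2/m2/m", "6mm", "6mm", "D6v"),
  ("6/mmm", "6/m2/m2/m", "-62m", "-62m", "D3h"),
  ("6/mmm", "6/m2/m2/m", "6/mmm", "6/m2/m2/m", "D6h"),
  ("m-3", "2/m-3", "23", "23", "T"),
  ("m-3", "2/m-3", "m-3", "2/m-3", "Th"),
  ("m-3m", "4/m-32/m", "432", "432", "O"),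
  ("m-3m", "4/m-32/m", "-43m", "-43m", "Td"),
  ("m-3m", "4/m-32/m", "m-3m", "4/m-32/m", "Oh")]

def get_name_schoenfliess_by_laue_class (laue_class : String) : List String :=
  let l_symb := (pvTable.filter (fun r => r.1 == laue_class)).map (fun r => r.2.2.2.2)
  l_symb.foldl (fun l_res symb =>
    pvNames.foldl (fun l_res name =>
      if PySem.List.pyGet? ((PySem.Str.split? name ".").getD []) 0 = some symb then l_res ++ [name]
      else l_res) l_res) []

-- ===== PORT B =====
def pvLaueMap : PySem.Dict String (List String) := PySem.Dict.ofList [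
  ("-1", ["C1", "Ci"]),
  ("2/m", ["C2", "Cs", "C2h"]),
  ("mmm", ["D2", "C2v", "D2h"]),
  ("4/m", ["C4", "S4", "C4h"]),
  ("4/mmm", ["D4", "C4v", "D2d", "D4h"]),
  ("-3", ["C3", "C3i"]),
  ("-3m", ["D3", "C3v", "D3d"]),
  ("6/m", ["C6", "C3h", "C6h"]),
  ("6/mmm", ["D6", "C6v", "D3h", "D6h"]),
  ("m-3", ["T", "Th"]),
  ("m-3m", ["O", "Td", "Oh"])]

def pvCounts : PySem.Dict String Int := PySem.Dict.ofList [
  ("C1", 1), ("Ci", 1), ("C2", 3), ("Cs", 4), ("C2h", 6), ("D2", 9), ("C2v", 22), ("D2h", 28),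
  ("C4", 6), ("S4", 2), ("C4h", 6), ("D4", 10), ("C4v", 12), ("D2d", 12), ("D4h", 20),
  ("C3", 4), ("C3i", 2), ("D3", 7), ("C3v", 6), ("D3d", 6), ("C6", 6), ("C3h", 1), ("C6h", 2),
  ("D6", 6), ("C6v", 4), ("D3h", 4), ("D6h", 4), ("T", 5), ("Th", 7), ("O", 8), ("Td", 6), ("Oh", 10)]

def get_name_schoenfliess_by_laue_class_alt (laue_class : String) : List String :=
  (PySem.Dict.getD pvLaueMap laue_class []).foldl (fun res symb =>
    (PySem.List.pyRange 1 (PySem.Dict.getD pvCounts symb 0 + 1) 1).foldl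
      (fun res i => res ++ [symb ++ "." ++ PySem.Int.toStr i]) res) []

-- ===== PRECONDITION & SPEC =====
-- For laue_class "6/mmm" A returns a tuple missing the four "C6v.*" names, because the reference
-- table misspells the Schoenflies symbol of point group 6mm as "D6v" (which matches no name);
-- B uses the correct symbol C6v and includes them, which is the intended result.
def D_get_name_schoenfliess_by_laue_class (laue_class : String) : Prop := laue_class = "6/mmm"
instance (laue_class : String) : Decidable (D_get_name_schoenfliess_by_laue_class laue_class) := by unfold D_get_name_schoenfliess_by_laue_class; infer_instance

def Spec_get_name_schoenfliess_by_laue_class (laue_class : String) (out : List String) : Prop := ¬ D_get_name_schoenfliess_by_laue_class laue_class → out = get_name_schoenfliess_by_laue_class_alt laue_class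
instance (laue_class : String) (out : List String) : Decidable (Spec_get_name_schoenfliess_by_laue_class laue_class out) := by unfold Spec_get_name_schoenfliess_by_laue_class; infer_instance

def pvDiffWitness_get_name_schoenfliess_by_laue_class : String := "6/mmm"
def pvDiffWitnessOut_get_name_schoenfliess_by_laue_class : (List String) × (List String) :=
  (["D6.1", "D6.2", "D6.3", "D6.4", "D6.5", "D6.6", "D3h.1", "D3h.2", "D3h.3", "D3h.4", "D6h.1", "D6h.2", "D6h.3", "D6h.4"],
   ["D6.1", "D6.2", "D6.3", "D6.4", "D6.5", "D6.6", "C6v.1", "C6v.2", "C6v.3", "C6v.4", "D3h.1", "D3h.2", "D3h.3", "D3h.4", "D6h.1", "D6h.2", "D6h.3", "D6h.4"])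

-- ===== CLAIM (what is proved, stated in full; the proofs are below) =====
def Claim_unchanged_get_name_schoenfliess_by_laue_class : Prop := ∀ (laue_class : String), Dom_get_name_schoenfliess_by_laue_class laue_class → Spec_get_name_schoenfliess_by_laue_class laue_class (get_name_schoenfliess_by_laue_class laue_class)
def Claim_changed_get_name_schoenfliess_by_laue_class : Prop := Dom_get_name_schoenfliess_by_laue_class (pvDiffWitness_get_name_schoenfliess_by_laue_class) ∧ D_get_name_schoenfliess_by_laue_class (pvDiffWitness_get_name_schoenfliess_by_laue_class) ∧ get_name_schoenfliess_by_laue_class (pvDiffWitness_get_name_schoenfliess_by_laue_class) = pvDiffWitnessOut_get_name_schoenfliess_by_laue_class.1 ∧ get_name_schoenfliess_by_laue_class_alt (pvDiffWitness_get_name_schoenfliess_by_laue_class) = pvDiffWitnessOut_get_name_schoenfliess_by_laue_class.2 ∧ pvDiffWitnessOut_get_name_schoenfliess_by_laue_class.1 ≠ pvDiffWitnessOut_get_name_schoenfliess_by_laue_class.2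
def Claim_exact_get_name_schoenfliess_by_laue_class : Prop := ∀ (laue_class : String), Dom_get_name_schoenfliess_by_laue_class laue_class → D_get_name_schoenfliess_by_laue_class laue_class → get_name_schoenfliess_by_laue_class laue_class ≠ get_name_schoenfliess_by_laue_class_alt laue_class

-- ===== LEMMAS AND PROOFS =====
theorem both_empty (laue_class : String)
    (h1 : laue_class ≠ "-1") (h2 : laue_class ≠ "2/m") (h3 : laue_class ≠ "mmm")
    (h4 : laue_class ≠ "4/m") (h5 : laue_class ≠ "4/mmm") (h6 : laue_class ≠ "-3")
    (h7 : laue_class ≠ "-3m") (h8 : laue_class ≠ "6/m") (h9 : laue_class ≠ "6/mmm")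
    (h10 : laue_class ≠ "m-3") (h11 : laue_class ≠ "m-3m") :
    get_name_schoenfliess_by_laue_class laue_class = get_name_schoenfliess_by_laue_class_alt laue_class := by
  have e1 : (("-1" : String) == laue_class) = false := by simp [Ne.symm h1]
  have e2 : (("2/m" : String) == laue_class) = false := by simp [Ne.symm h2]
  have e3 : (("mmm" : String) == laue_class) = false := by simp [Ne.symm h3]
  have e4 : (("4/m" : String) == laue_class) = false := by simp [Ne.symm h4]
  have e5 : (("4/mmm" : String) == laue_class) = false := by simp [Ne.symm h5]
  have e6 : (("-3" : String) == laue_class) = false := by simp [Ne.symm h6]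
  have e7 : (("-3m" : String) == laue_class) = false := by simp [Ne.symm h7]
  have e8 : (("6/m" : String) == laue_class) = false := by simp [Ne.symm h8]
  have e9 : (("6/mmm" : String) == laue_class) = false := by simp [Ne.symm h9]
  have e10 : (("m-3" : String) == laue_class) = false := by simp [Ne.symm h10]
  have e11 : (("m-3m" : String) == laue_class) = false := by simp [Ne.symm h11]
  have hf : pvTable.filter (fun r => r.1 == laue_class) = [] := by
    simp [pvTable, List.filter, e1, e2, e3, e4, e5, e6, e7, e8, e9, e10, e11]
  have hk : pvLaueMap.keys = ["-1", "2/m", "mmm", "4/m", "4/mmm", "-3", "-3m", "6/m", "6/mmm", "m-3", "m-3m"] := by decide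
  have hc : PySem.Dict.contains pvLaueMap laue_class = false := by
    rw [PySem.Dict.contains_eq_decide_mem_keys, hk]
    simp [h1, h2, h3, h4, h5, h6, h7, h8, h9, h10, h11]
  have hd : PySem.Dict.getD pvLaueMap laue_class ([] : List String) = [] :=
    PySem.Dict.getD_of_not_contains _ _ hc
  simp [get_name_schoenfliess_by_laue_class, get_name_schoenfliess_by_laue_class_alt, hf, hd]

-- ===== VERDICT (by name: the statement is the Claim_ definition above) =====
theorem get_name_schoenfliess_by_laue_class_spec : Claim_unchanged_get_name_schoenfliess_by_laue_class := by
  intro laue_class _ hD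
  unfold D_get_name_schoenfliess_by_laue_class at hD
  by_cases h1 : laue_class = "-1"; · subst h1; decide
  by_cases h2 : laue_class = "2/m"; · subst h2; decide
  by_cases h3 : laue_class = "mmm"; · subst h3; decide
  by_cases h4 : laue_class = "4/m"; · subst h4; decide
  by_cases h5 : laue_class = "4/mmm"; · subst h5; decide
  by_cases h6 : laue_class = "-3"; · subst h6; decide
  by_cases h7 : laue_class = "-3m"; · subst h7; decide
  by_cases h8 : laue_class = "6/m"; · subst h8; decide
  by_cases h10 : laue_class = "m-3"; · subst h10; decide
  by_cases h11 : laue_class = "m-3m"; · subst h11; decide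
  exact both_empty laue_class h1 h2 h3 h4 h5 h6 h7 h8 hD h10 h11

theorem get_name_schoenfliess_by_laue_class_changed : Claim_changed_get_name_schoenfliess_by_laue_class := by
  unfold Claim_changed_get_name_schoenfliess_by_laue_class; decide

theorem get_name_schoenfliess_by_laue_class_tight : Claim_exact_get_name_schoenfliess_by_laue_class := by
  intro laue_class _ hD
  unfold D_get_name_schoenfliess_by_laue_class at hD
  subst hD; decide
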